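-- pv_equiv track=rewrite | github.com/o4dvasq/arec-crm | app/drain_inbox.py | _parse_header_block
-- ===== SOURCE A (Python) =====
-- def _parse_header_block(lines: list[str]) -> tuple[str, str]:
--     """
--     Extract From and Subject values from a list of header lines.
--     Returns (original_from, original_subject).
--     """
--     original_from = ""
--     original_subject = ""
--     for line in lines:
--         stripped = line.strip()
--         if stripped.lower().startswith("from:") and not original_from:
--             original_from = stripped[5:].strip()
--         elif stripped.lower().startswith("subject:") and not original_subject:
--             original_subject = stripped[8:].strip()
--     return original_from, original_subject
-- ===== SOURCE B (Python) =====
-- def _first_value(lines, prefix):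
--     n = len(prefix)
--     for line in lines:
--         stripped = line.strip()
--         if stripped.lower().startswith(prefix):
--             value = stripped[n:].strip()
--             if value:
--                 return value
--     return ""
--
--
-- def _parse_header_block(lines):
--     return _first_value(lines, "from:"), _first_value(lines, "subject:")
-- ===== Notes on version B (the rewrite author's own statement) =====
-- stated objective: simpler
-- what changed: Replaces A's single pass threading a (from, subject) accumulator with two independent first-nonempty-match scans, one per header field, via a shared helper.
import Mathlib
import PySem

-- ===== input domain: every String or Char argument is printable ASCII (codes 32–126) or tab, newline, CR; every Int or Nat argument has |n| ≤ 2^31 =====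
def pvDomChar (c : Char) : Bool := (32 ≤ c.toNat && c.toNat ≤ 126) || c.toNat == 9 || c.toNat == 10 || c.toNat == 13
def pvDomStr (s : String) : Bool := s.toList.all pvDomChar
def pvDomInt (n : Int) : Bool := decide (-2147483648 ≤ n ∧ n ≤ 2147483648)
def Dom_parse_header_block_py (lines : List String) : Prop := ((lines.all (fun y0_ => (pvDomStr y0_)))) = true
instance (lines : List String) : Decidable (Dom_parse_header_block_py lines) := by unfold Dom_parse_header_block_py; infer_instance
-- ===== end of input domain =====

-- B computes each field by its own independent first-match scan instead of A's single flag-carrying fold (objective: simpler).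


-- ===== PORT A =====
def pvStepA (acc : String × String) (line : String) : String × String :=
  let stripped := PySem.Str.strip line
  if PySem.Str.startswith (PySem.Str.lower stripped) "from:" && acc.1 == "" then
    (PySem.Str.strip (PySem.Str.slice stripped (some 5) none), acc.2)
  else if PySem.Str.startswith (PySem.Str.lower stripped) "subject:" && acc.2 == "" then
    (acc.1, PySem.Str.strip (PySem.Str.slice stripped (some 8) none))
  else acc

def parse_header_block_py (lines : List String) : String × String :=
  lines.foldl pvStepA ("", "")

-- ===== PORT B =====
def pvFirstValue (lines : List String) (pfx : String) : String :=
  let n : Int := PySem.Str.len pfx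
  pvFirstValueGo n pfx lines
where
  pvFirstValueGo (n : Int) (pfx : String) : List String → String
    | [] => ""
    | line :: rest =>
      let stripped := PySem.Str.strip line
      if PySem.Str.startswith (PySem.Str.lower stripped) pfx then
        let value := PySem.Str.strip (PySem.Str.slice stripped (some n) none)
        if value ≠ "" then value else pvFirstValueGo n pfx rest
      else pvFirstValueGo n pfx rest

def parse_header_block_py_alt (lines : List String) : String × String :=
  (pvFirstValue lines "from:", pvFirstValue lines "subject:")

-- ===== PRECONDITION & SPEC =====
def Spec_parse_header_block_py (lines : List String) (out : String × String) : Prop := out = parse_header_block_py_alt lines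
instance (lines : List String) (out : String × String) : Decidable (Spec_parse_header_block_py lines out) := by unfold Spec_parse_header_block_py; infer_instance

-- ===== CLAIM (what is proved, stated in full; the proofs are below) =====
def Claim_equal_parse_header_block_py : Prop := ∀ (lines : List String), Dom_parse_header_block_py lines → Spec_parse_header_block_py lines (parse_header_block_py lines)

-- ===== LEMMAS AND PROOFS =====

-- a line cannot start with both "from:" and "subject:"
theorem pv_not_both (L : List Char)
    (h : PySem.Chars.startswith L ['f','r','o','m',':'] = true) :
    PySem.Chars.startswith L ['s','u','b','j','e','c','t',':'] = false := by
  by_contra hc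
  rw [Bool.not_eq_false] at hc
  rw [PySem.Chars.startswith_iff] at h hc
  obtain ⟨t1, h1⟩ := h
  obtain ⟨t2, h2⟩ := hc
  rw [← h1] at h2
  simp at h2

theorem pv_fold_eq (lines : List String) (f s : String) :
    lines.foldl pvStepA (f, s) =
      ((if f = "" then pvFirstValue.pvFirstValueGo 5 "from:" lines else f),
       (if s = "" then pvFirstValue.pvFirstValueGo 8 "subject:" lines else s)) := by
  induction lines generalizing f s with
  | nil => simp [pvFirstValue.pvFirstValueGo]
  | cons l rest ih =>
    simp only [List.foldl_cons]
    by_cases hf : PySem.Chars.startswith (PySem.Chars.lower (PySem.Chars.strip l.toList)) ['f','r','o','m',':'] = true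
    · have hs := pv_not_both _ hf
      by_cases hfe : f = ""
      · subst hfe
        simp [pvStepA, hf, hs, ih, pvFirstValue.pvFirstValueGo]
      · simp [pvStepA, hf, hs, hfe, ih, pvFirstValue.pvFirstValueGo]
    · rw [Bool.not_eq_true] at hf
      by_cases hs : PySem.Chars.startswith (PySem.Chars.lower (PySem.Chars.strip l.toList)) ['s','u','b','j','e','c','t',':'] = true
      · by_cases hse : s = ""
        · subst hse
          simp [pvStepA, hf, hs, ih, pvFirstValue.pvFirstValueGo]
        · simp [pvStepA, hf, hs, hse, ih, pvFirstValue.pvFirstValueGo]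
      · rw [Bool.not_eq_true] at hs
        simp [pvStepA, hf, hs, ih, pvFirstValue.pvFirstValueGo]

-- ===== VERDICT (by name: the statement is the Claim_ definition above) =====
theorem parse_header_block_py_spec : Claim_equal_parse_header_block_py := by
  intro lines _
  unfold Spec_parse_header_block_py parse_header_block_py parse_header_block_py_alt pvFirstValue
  rw [pv_fold_eq]
  simp
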